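-- pv_equiv track=rewrite | github.com/GiWoonHwang/Coding-test | programmers/light.cicle.py | solution
-- ===== SOURCE A (Python) =====
-- def solution(grid):
--     answer = []
--     rows, cols = len(grid), len(grid[0])
--     # 빛의 경로는 왼,오,위,아 뿐이다 따라서 False for _ in range(4)를 통해 빛이 이동한 경로인지 체크한다.
--     gone = [[[False for _ in range(4)] for _ in range(cols)] for _ in range(rows)]
--     go = [[-1,0], [0,1], [1,0], [0,-1]]
--
--     # 행,열,방향
--     def travel(r,c,d):
--         count = 0
--         while True:
--             gone[r][c][d] = True
--             count += 1
--
--             # 현재 방향에서 상하좌우로 움직여 탐색할 준비함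
--             dr, dc = go[d]
--             rr,cc = r + dr, c + dc
--
--             # 경계를 넘는 경우 처리
--             # 예를 들어, 그리드의 행 수가 5 (rows = 5)이고 rr = 5인 경우, (5 + 5) % 5 = 10 % 5 = 0이 되어 r은 다시 0행으로 돌아갑니다.
--             r = (rr + rows) % rows
--             c = (cc + cols) % cols
--
--
--             # 0,1,2,3를 위,오,아,왼으로 잡고
--             if grid[r][c] == 'L':
--                 d = (d + 3) % 4  # 왼쪽으로 90도 회전
--             elif grid[r][c] == 'R':
--                 d = (d + 1) % 4  # 오른쪽으로 90도 회전
--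
--             # 만약 이미 방문한 위치와 방향이면 종료
--             if gone[r][c][d]:
--                 break
--         return count
--
--     for i in range(rows) :
--         for j in range(cols) :
--             for k in range(4) :
--                 if not gone[i][j][k] :
--                     r,c,d = i,j,k
--                     answer.append(travel(r,c,d))
--
--     return sorted(answer)
-- ===== SOURCE B (Python) =====
-- def solution(grid):
--     rows, cols = len(grid), len(grid[0])
--     n = rows * cols * 4
--     go = ((-1, 0), (0, 1), (1, 0), (0, -1))
--
--     # successor of the encoded state s = (r*cols + c)*4 + d
--     def nxt(s):
--         d = s % 4
--         rc = s // 4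
--         c = rc % cols
--         r = rc // cols
--         dr, dc = go[d]
--         r2 = (r + dr + rows) % rows
--         c2 = (c + dc + cols) % cols
--         ch = grid[r2][c2]
--         if ch == 'L':
--             d2 = (d + 3) % 4
--         elif ch == 'R':
--             d2 = (d + 1) % 4
--         else:
--             d2 = d
--         return (r2 * cols + c2) * 4 + d2
--
--     # The transition is a permutation (each state has a unique predecessor:
--     # undo the turn written at the target cell, then step back), so the state
--     # graph is a disjoint union of cycles.  Enumerate each cycle exactly once,
--     # at its smallest state ("cycle leader"), with no visited structure at all:
--     # walk from s while the states stay above s; we come back to s itself iff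
--     # s is the minimum of its cycle, and then the walk's length is the cycle length.
--     lengths = []
--     for s in range(n):
--         t = nxt(s)
--         length = 1
--         while t > s:
--             t = nxt(t)
--             length += 1
--         if t == s:
--             lengths.append(length)
--     return sorted(lengths)
-- ===== Notes on version B (the rewrite author's own statement) =====
-- stated objective: alternative
-- what changed: A marks a rows x cols x 4 visited cube and walks the beam from every unvisited state, counting until it re-hits a visited state; B keeps no visited structure at all: it proves the transition on encoded states s=(r*cols+c)*4+d is a permutation and enumerates each cycle once by its smallest state (cycle-leader walk: from each s follow the successor while states stay above s; the walk returns to s iff s is the cycle's minimum, and its length is then the cycle length).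
import Mathlib
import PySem

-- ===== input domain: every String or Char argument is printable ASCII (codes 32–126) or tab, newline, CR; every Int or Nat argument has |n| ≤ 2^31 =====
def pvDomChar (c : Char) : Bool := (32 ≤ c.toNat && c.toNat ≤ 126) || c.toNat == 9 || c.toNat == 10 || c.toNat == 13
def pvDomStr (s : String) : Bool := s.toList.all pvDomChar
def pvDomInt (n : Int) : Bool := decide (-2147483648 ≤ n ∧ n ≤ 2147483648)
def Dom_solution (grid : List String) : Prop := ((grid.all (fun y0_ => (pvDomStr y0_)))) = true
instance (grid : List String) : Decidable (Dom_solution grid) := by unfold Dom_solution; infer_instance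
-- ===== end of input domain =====

-- B replaces A's visited-cube walk by a cycle-leader enumeration: the transition on
-- encoded states s = (r*cols+c)*4+d is a permutation, so B walks from each s while the
-- states stay above s and records a cycle (once, at its smallest state) exactly when the
-- walk returns to s itself — no visited structure at all (objective: alternative).

-- ===== PORT A =====
-- go = [[-1,0],[0,1],[1,0],[0,-1]]
def pvDirs : List (Int × Int) := [(-1, 0), (0, 1), (1, 0), (0, -1)]
-- grid[r][c]  (none exactly where Python raises IndexError; Pre_ keeps indices in range)
def pvCell (grid : List String) (r c : Int) : Option Char :=
  (PySem.List.pyGet? grid r).bind (fun s => PySem.Str.pyGet? s c)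
-- gone[r][c][d]  (indices are provably in range wherever the ports read/write)
def pvGet3 (g : List (List (List Bool))) (r c d : Int) : Bool :=
  PySem.List.pyGetD (PySem.List.pyGetD (PySem.List.pyGetD g r []) c []) d false
-- gone[r][c][d] = True
def pvSet3 (g : List (List (List Bool))) (r c d : Int) : List (List (List Bool)) :=
  PySem.List.pySetD g r (PySem.List.pySetD (PySem.List.pyGetD g r []) c
    (PySem.List.pySetD (PySem.List.pyGetD (PySem.List.pyGetD g r []) c []) d true))

-- the body of travel's `while True` loop; the fuel only makes the recursion structural
-- (each pass marks a previously unmarked of the rows*cols*4 states, so fuel = rows*cols*4+1 is never exhausted)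
def pvTravel (grid : List String) (rows cols : Int) :
    Nat → Int → Int → Int → List (List (List Bool)) → Int → Int × List (List (List Bool))
  | 0, _, _, _, gone, count => (count, gone)
  | fuel + 1, r, c, d, gone, count =>
    let gone1 := pvSet3 gone r c d
    let count1 := count + 1
    let dir := PySem.List.pyGetD pvDirs d (0, 0)
    let r1 := PySem.Int.mod (r + dir.1 + rows) rows
    let c1 := PySem.Int.mod (c + dir.2 + cols) cols
    let d1 := if pvCell grid r1 c1 = some 'L' then PySem.Int.mod (d + 3) 4
      else if pvCell grid r1 c1 = some 'R' then PySem.Int.mod (d + 1) 4 else d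
    if pvGet3 gone1 r1 c1 d1 then (count1, gone1)
    else pvTravel grid rows cols fuel r1 c1 d1 gone1 count1

def solution (grid : List String) : List Int :=
  let rows : Int := PySem.List.len grid
  let cols : Int := PySem.Str.len (PySem.List.pyGetD grid 0 "")
  let gone0 : List (List (List Bool)) :=
    (PySem.List.pyRange 0 rows 1).map (fun _ =>
      (PySem.List.pyRange 0 cols 1).map (fun _ =>
        (PySem.List.pyRange 0 4 1).map (fun _ => false)))
  let fuel := (rows * cols * 4).toNat + 1
  let res := (PySem.List.pyRange 0 rows 1).foldl (fun st i =>
      (PySem.List.pyRange 0 cols 1).foldl (fun st j =>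
        (PySem.List.pyRange 0 4 1).foldl (fun st k =>
          if pvGet3 st.1 i j k then st
          else
            let p := pvTravel grid rows cols fuel i j k st.1 0
            (p.2, st.2 ++ [p.1])) st) st) (gone0, ([] : List Int))
  PySem.List.sorted res.2 (fun x => x) false

-- ===== PORT B =====
-- B's nxt: successor of the encoded state s = (r*cols + c)*4 + d
def pvNext (grid : List String) (rows cols : Int) (s : Int) : Int :=
  let d := PySem.Int.mod s 4
  let rc := PySem.Int.floordiv s 4
  let c := PySem.Int.mod rc cols
  let r := PySem.Int.floordiv rc cols
  let dir := PySem.List.pyGetD pvDirs d (0, 0)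
  let r2 := PySem.Int.mod (r + dir.1 + rows) rows
  let c2 := PySem.Int.mod (c + dir.2 + cols) cols
  let d2 := if pvCell grid r2 c2 = some 'L' then PySem.Int.mod (d + 3) 4
    else if pvCell grid r2 c2 = some 'R' then PySem.Int.mod (d + 1) 4 else d
  (r2 * cols + c2) * 4 + d2

-- B's `while t > s: t = nxt(t); length += 1`; the fuel only makes the recursion
-- structural (the walk returns to a state ≤ s within n = rows*cols*4 steps)
def pvBwalk (grid : List String) (rows cols sVal : Int) : Nat → Int → Int → Int × Int
  | 0, t, length => (t, length)
  | fuel + 1, t, length =>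
    if sVal < t then
      pvBwalk grid rows cols sVal fuel (pvNext grid rows cols t) (length + 1)
    else (t, length)

def solution_alt (grid : List String) : List Int :=
  let rows : Int := PySem.List.len grid
  let cols : Int := PySem.Str.len (PySem.List.pyGetD grid 0 "")
  let n := rows * cols * 4
  let fuel := n.toNat + 1
  let lengths := (PySem.List.pyRange 0 n 1).foldl (fun (lengths : List Int) s =>
      let p := pvBwalk grid rows cols s fuel (pvNext grid rows cols s) 1
      if p.1 = s then lengths ++ [p.2] else lengths) []
  PySem.List.sorted lengths (fun x => x) false

-- ===== PRECONDITION & SPEC =====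
-- Pre_ excludes exactly the inputs where A raises: the empty list (grid[0] is an
-- IndexError) and grids in which some row is shorter than row 0 (grid[r][c] then raises,
-- since every cell of the first len(grid[0]) columns is eventually stepped onto).  Rows
-- longer than row 0 are fine, as is a grid of empty rows (A returns []).
def Pre_solution (grid : List String) : Prop :=
  grid ≠ [] ∧
  ∀ s ∈ grid, PySem.Str.len (PySem.List.pyGetD grid 0 "") ≤ PySem.Str.len s
instance (grid : List String) : Decidable (Pre_solution grid) := by
  unfold Pre_solution; infer_instance
def pvWitness_solution : List String := ["SL", "RS"]
def Spec_solution (grid : List String) (out : List Int) : Prop := out = solution_alt grid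
instance (grid : List String) (out : List Int) : Decidable (Spec_solution grid out) := by
  unfold Spec_solution; infer_instance

-- ===== CLAIM (what is proved, stated in full; the proofs are below) =====
def Claim_equal_solution : Prop :=
  ∀ (grid : List String), Dom_solution grid → Pre_solution grid →
    Spec_solution grid (solution grid)

-- ===== LEMMAS AND PROOFS =====

-- proof-only intermediate: A's algorithm flattened to encoded states — a visited-array
-- cycle decomposition over the successor list (pvWalk is A's travel on encoded states)
def pvWalk (succ : List Int) : Nat → Int → List Bool → Int → Int × List Bool
  | 0, _, v, cnt => (cnt, v)
  | fuel + 1, t, v, cnt =>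
    let v1 := PySem.List.pySetD v t true
    let cnt1 := cnt + 1
    let t1 := PySem.List.pyGetD succ t 0
    if PySem.List.pyGetD v1 t1 false then (cnt1, v1)
    else pvWalk succ fuel t1 v1 cnt1

def pvFlatCore (grid : List String) (rows cols : Int) : List Int :=
  let n := rows * cols * 4
  let succ := (PySem.List.pyRange 0 n 1).foldl
    (fun acc s => acc ++ [pvNext grid rows cols s]) []
  let fuel := n.toNat + 1
  ((PySem.List.pyRange 0 n 1).foldl (fun (st : List Bool × List Int) s =>
      if PySem.List.pyGetD st.1 s false then st
      else
        let p := pvWalk succ fuel s st.1 0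
        (p.2, st.2 ++ [p.1])) (PySem.List.pyRepeat [false] n, ([] : List Int))).2

-- proof-only notions: the state encoding, the in-range predicate, the shape of A's cube,
-- and the simulation relation between A's cube and the flat visited list
def pvEnc (cols r c d : Int) : Int := (r * cols + c) * 4 + d
def pvInR (rows cols r c d : Int) : Prop :=
  0 ≤ r ∧ r < rows ∧ 0 ≤ c ∧ c < cols ∧ 0 ≤ d ∧ d < 4
def pvShape (rows cols : Int) (g : List (List (List Bool))) : Prop :=
  g.length = rows.toNat ∧ ∀ row ∈ g, row.length = cols.toNat ∧ ∀ cell ∈ row, cell.length = 4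
def pvRel (rows cols : Int) (g : List (List (List Bool))) (v : List Bool) : Prop :=
  pvShape rows cols g ∧ v.length = (rows * cols * 4).toNat ∧
  ∀ r c d, pvInR rows cols r c d →
    pvGet3 g r c d = v.getD (pvEnc cols r c d).toNat false

lemma pvPyGetD_nonneg {α : Type} (xs : List α) {i : Int} (d : α) (h : 0 ≤ i) :
    PySem.List.pyGetD xs i d = xs.getD i.toNat d := by
  obtain ⟨n, rfl⟩ := Int.eq_ofNat_of_zero_le h
  simp [List.getD]

lemma pvGet3_eq_getD {g : List (List (List Bool))} {r c d : Int}
    (h1 : 0 ≤ r) (h2 : 0 ≤ c) (h3 : 0 ≤ d) :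
    pvGet3 g r c d = ((g.getD r.toNat []).getD c.toNat []).getD d.toNat false := by
  unfold pvGet3
  rw [pvPyGetD_nonneg _ _ h1, pvPyGetD_nonneg _ _ h2, pvPyGetD_nonneg _ _ h3]

lemma pvSet3_eq_set {g : List (List (List Bool))} {r c d : Int}
    (h1 : 0 ≤ r) (h2 : 0 ≤ c) (h3 : 0 ≤ d) :
    pvSet3 g r c d = g.set r.toNat ((g.getD r.toNat []).set c.toNat
      (((g.getD r.toNat []).getD c.toNat []).set d.toNat true)) := by
  unfold pvSet3
  simp only [PySem.List.pySetD_of_nonneg _ _ h1, PySem.List.pySetD_of_nonneg _ _ h2,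
    PySem.List.pySetD_of_nonneg _ _ h3, pvPyGetD_nonneg _ _ h1, pvPyGetD_nonneg _ _ h2]

lemma pvGetD_set {α : Type} (l : List α) (i j : Nat) (a d : α) (hi : i < l.length) :
    (l.set i a).getD j d = if i = j then a else l.getD j d := by
  simp only [List.getD_eq_getElem?_getD, List.getElem?_set]
  split
  · rename_i h; subst h; simp
  · rfl

lemma pvGetD_mem_or {α : Type} (l : List α) (j : Nat) (d : α) :
    l.getD j d ∈ l ∨ l.getD j d = d := by
  by_cases h : j < l.length
  · left; rw [List.getD_eq_getElem _ _ h]; exact List.getElem_mem h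
  · right; rw [List.getD_eq_default _ _ (by omega)]

lemma pvShape_set3 {rows cols : Int} {g : List (List (List Bool))} {r c d : Int}
    (hs : pvShape rows cols g) (h : pvInR rows cols r c d) :
    pvShape rows cols (pvSet3 g r c d) := by
  obtain ⟨h1, h2, h3, h4, h5, h6⟩ := h
  obtain ⟨hl, hrow⟩ := hs
  rw [pvSet3_eq_set h1 h3 h5]
  have hrlt : r.toNat < g.length := by omega
  have hrowmem : g.getD r.toNat [] ∈ g := by
    rw [List.getD_eq_getElem _ _ hrlt]; exact List.getElem_mem hrlt
  obtain ⟨hrl, hcell⟩ := hrow _ hrowmem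
  have hcmem : (g.getD r.toNat []).getD c.toNat [] ∈ g.getD r.toNat [] := by
    have : c.toNat < (g.getD r.toNat []).length := by omega
    rw [List.getD_eq_getElem _ _ this]; exact List.getElem_mem this
  refine ⟨by simpa using hl, ?_⟩
  intro row hmem
  rcases List.mem_or_eq_of_mem_set hmem with hmem' | rfl
  · exact hrow _ hmem'
  · refine ⟨by simpa using hrl, ?_⟩
    intro cell hcm
    rcases List.mem_or_eq_of_mem_set hcm with hcm' | rfl
    · exact hcell _ hcm'
    · simpa using (hcell _ hcmem)

lemma pvGet3_set3 {rows cols : Int} {g : List (List (List Bool))} {r c d r' c' d' : Int}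
    (hs : pvShape rows cols g) (h : pvInR rows cols r c d) (h' : pvInR rows cols r' c' d') :
    pvGet3 (pvSet3 g r c d) r' c' d' =
      if r = r' ∧ c = c' ∧ d = d' then true else pvGet3 g r' c' d' := by
  obtain ⟨h1, h2, h3, h4, h5, h6⟩ := h
  obtain ⟨h1', h2', h3', h4', h5', h6'⟩ := h'
  obtain ⟨hl, hrow⟩ := hs
  have hrlt : r.toNat < g.length := by omega
  have hrowmem : g.getD r.toNat [] ∈ g := by
    rw [List.getD_eq_getElem _ _ hrlt]; exact List.getElem_mem hrlt
  obtain ⟨hrl, hcell⟩ := hrow _ hrowmem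
  have hcmem : (g.getD r.toNat []).getD c.toNat [] ∈ g.getD r.toNat [] := by
    have : c.toNat < (g.getD r.toNat []).length := by omega
    rw [List.getD_eq_getElem _ _ this]; exact List.getElem_mem this
  have hcl := hcell _ hcmem
  rw [pvGet3_eq_getD h1' h3' h5', pvSet3_eq_set h1 h3 h5,
    pvGetD_set _ _ _ _ _ (by omega)]
  by_cases hrr : r = r'
  · subst hrr
    rw [if_pos (by rfl), pvGetD_set _ _ _ _ _ (by omega)]
    by_cases hcc : c = c'
    · subst hcc
      rw [if_pos (by rfl), pvGetD_set _ _ _ _ _ (by omega)]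
      by_cases hdd : d = d'
      · subst hdd
        rw [if_pos (by rfl), if_pos ⟨rfl, rfl, rfl⟩]
      · rw [if_neg (show ¬(d.toNat = d'.toNat) by omega),
          if_neg (fun hcon => hdd hcon.2.2), pvGet3_eq_getD h1 h3 h5']
    · rw [if_neg (show ¬(c.toNat = c'.toNat) by omega),
        if_neg (fun hcon => hcc hcon.2.1), pvGet3_eq_getD h1 h3' h5']
  · rw [if_neg (show ¬(r.toNat = r'.toNat) by omega),
      if_neg (fun hcon => hrr hcon.1), pvGet3_eq_getD h1' h3' h5']

lemma pvEnc_nonneg {rows cols r c d : Int} (h : pvInR rows cols r c d) :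
    0 ≤ pvEnc cols r c d := by
  obtain ⟨h1, h2, h3, h4, h5, h6⟩ := h
  have : 0 ≤ r * cols := mul_nonneg h1 (le_trans h3 h4.le)
  unfold pvEnc; nlinarith

lemma pvEnc_lt {rows cols r c d : Int} (h : pvInR rows cols r c d) :
    pvEnc cols r c d < rows * cols * 4 := by
  obtain ⟨h1, h2, h3, h4, h5, h6⟩ := h
  have hr : r * cols + c ≤ rows * cols - 1 := by nlinarith
  unfold pvEnc; nlinarith

lemma pvDec_d {rows cols r c d : Int} (h : pvInR rows cols r c d) :
    PySem.Int.mod (pvEnc cols r c d) 4 = d := by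
  obtain ⟨h1, h2, h3, h4, h5, h6⟩ := h
  rw [PySem.Int.mod_eq_emod_of_pos (by norm_num)]
  unfold pvEnc
  generalize r * cols + c = x
  omega

lemma pvDec_rc {rows cols r c d : Int} (h : pvInR rows cols r c d) :
    PySem.Int.floordiv (pvEnc cols r c d) 4 = r * cols + c := by
  obtain ⟨h1, h2, h3, h4, h5, h6⟩ := h
  rw [PySem.Int.floordiv_eq_ediv_of_pos (by norm_num)]
  unfold pvEnc
  generalize r * cols + c = x
  omega

lemma pvDec_c {rows cols r c d : Int} (hc : 0 < cols) (h : pvInR rows cols r c d) :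
    PySem.Int.mod (r * cols + c) cols = c := by
  obtain ⟨h1, h2, h3, h4, h5, h6⟩ := h
  rw [PySem.Int.mod_eq_emod_of_pos hc, add_comm, Int.add_mul_emod_self_right]
  exact Int.emod_eq_of_lt h3 h4

lemma pvDec_r {rows cols r c d : Int} (hc : 0 < cols) (h : pvInR rows cols r c d) :
    PySem.Int.floordiv (r * cols + c) cols = r := by
  obtain ⟨h1, h2, h3, h4, h5, h6⟩ := h
  rw [PySem.Int.floordiv_eq_ediv_of_pos hc, add_comm, Int.add_mul_ediv_right _ _ hc.ne',
    Int.ediv_eq_zero_of_lt h3 h4, zero_add]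

lemma pvEnc_inj {rows cols r c d r' c' d' : Int} (hc : 0 < cols)
    (h : pvInR rows cols r c d) (h' : pvInR rows cols r' c' d')
    (he : pvEnc cols r c d = pvEnc cols r' c' d') : r = r' ∧ c = c' ∧ d = d' := by
  have hd : d = d' := by rw [← pvDec_d h, he, pvDec_d h']
  have hrc : r * cols + c = r' * cols + c' := by
    rw [← pvDec_rc h, he, pvDec_rc h']
  have hcc : c = c' := by rw [← pvDec_c hc h, hrc, pvDec_c hc h']
  have hrr : r = r' := by
    rw [hcc] at hrc
    have h2 : r * cols = r' * cols := by omega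
    exact mul_right_cancel₀ hc.ne' h2
  exact ⟨hrr, hcc, hd⟩

lemma pvRel_mark {rows cols : Int} {g : List (List (List Bool))} {v : List Bool}
    {r c d : Int} (hc : 0 < cols) (hrel : pvRel rows cols g v) (h : pvInR rows cols r c d) :
    pvRel rows cols (pvSet3 g r c d) (v.set (pvEnc cols r c d).toNat true) := by
  obtain ⟨hs, hvl, hpt⟩ := hrel
  refine ⟨pvShape_set3 hs h, by simpa using hvl, ?_⟩
  intro r' c' d' h'
  rw [pvGet3_set3 hs h h', pvGetD_set _ _ _ _ _ (by
    rw [hvl]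
    have := pvEnc_lt h
    have := pvEnc_nonneg h
    omega)]
  by_cases heq : r = r' ∧ c = c' ∧ d = d'
  · obtain ⟨rfl, rfl, rfl⟩ := heq
    rw [if_pos rfl, if_pos ⟨rfl, rfl, rfl⟩]
  · rw [if_neg heq, if_neg (fun hcon => by
      have he : pvEnc cols r c d = pvEnc cols r' c' d' := by
        have := pvEnc_nonneg h; have := pvEnc_nonneg h'; omega
      exact heq (pvEnc_inj hc h h' he)), hpt _ _ _ h']

lemma pvStep_inR {grid : List String} {rows cols r c d : Int} (hr : 0 < rows) (hc : 0 < cols)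
    (h : pvInR rows cols r c d) :
    pvInR rows cols
      (PySem.Int.mod (r + (PySem.List.pyGetD pvDirs d (0, 0)).1 + rows) rows)
      (PySem.Int.mod (c + (PySem.List.pyGetD pvDirs d (0, 0)).2 + cols) cols)
      (if pvCell grid
            (PySem.Int.mod (r + (PySem.List.pyGetD pvDirs d (0, 0)).1 + rows) rows)
            (PySem.Int.mod (c + (PySem.List.pyGetD pvDirs d (0, 0)).2 + cols) cols) = some 'L'
        then PySem.Int.mod (d + 3) 4
        else if pvCell grid
            (PySem.Int.mod (r + (PySem.List.pyGetD pvDirs d (0, 0)).1 + rows) rows)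
            (PySem.Int.mod (c + (PySem.List.pyGetD pvDirs d (0, 0)).2 + cols) cols) = some 'R'
        then PySem.Int.mod (d + 1) 4 else d) := by
  obtain ⟨h1, h2, h3, h4, h5, h6⟩ := h
  refine ⟨PySem.Int.mod_nonneg _ hr, PySem.Int.mod_lt _ hr,
    PySem.Int.mod_nonneg _ hc, PySem.Int.mod_lt _ hc, ?_, ?_⟩ <;>
  · split
    · exact (by first
        | exact PySem.Int.mod_nonneg _ (by norm_num)
        | exact PySem.Int.mod_lt _ (by norm_num))
    · split
      · exact (by first
          | exact PySem.Int.mod_nonneg _ (by norm_num)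
          | exact PySem.Int.mod_lt _ (by norm_num))
      · omega

lemma pvNext_enc {grid : List String} {rows cols r c d : Int} (hc : 0 < cols)
    (h : pvInR rows cols r c d) :
    pvNext grid rows cols (pvEnc cols r c d) =
      pvEnc cols
        (PySem.Int.mod (r + (PySem.List.pyGetD pvDirs d (0, 0)).1 + rows) rows)
        (PySem.Int.mod (c + (PySem.List.pyGetD pvDirs d (0, 0)).2 + cols) cols)
        (if pvCell grid
              (PySem.Int.mod (r + (PySem.List.pyGetD pvDirs d (0, 0)).1 + rows) rows)
              (PySem.Int.mod (c + (PySem.List.pyGetD pvDirs d (0, 0)).2 + cols) cols) = some 'L'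
          then PySem.Int.mod (d + 3) 4
          else if pvCell grid
              (PySem.Int.mod (r + (PySem.List.pyGetD pvDirs d (0, 0)).1 + rows) rows)
              (PySem.Int.mod (c + (PySem.List.pyGetD pvDirs d (0, 0)).2 + cols) cols) = some 'R'
          then PySem.Int.mod (d + 1) 4 else d) := by
  show (let d' := PySem.Int.mod (pvEnc cols r c d) 4
    let rc := PySem.Int.floordiv (pvEnc cols r c d) 4
    let c' := PySem.Int.mod rc cols
    let r' := PySem.Int.floordiv rc cols
    let dir := PySem.List.pyGetD pvDirs d' (0, 0)
    let r2 := PySem.Int.mod (r' + dir.1 + rows) rows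
    let c2 := PySem.Int.mod (c' + dir.2 + cols) cols
    let d2 := if pvCell grid r2 c2 = some 'L' then PySem.Int.mod (d' + 3) 4
      else if pvCell grid r2 c2 = some 'R' then PySem.Int.mod (d' + 1) 4 else d'
    (r2 * cols + c2) * 4 + d2) = _
  simp only [pvDec_d h, pvDec_rc h, pvDec_c hc h, pvDec_r hc h]
  rfl

lemma pvWalk_sim {grid : List String} {rows cols : Int} (hr : 0 < rows) (hc : 0 < cols) :
    ∀ (fuel : Nat) (r c d : Int) (g : List (List (List Bool))) (v : List Bool) (cnt : Int),
      pvInR rows cols r c d → pvRel rows cols g v →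
      (pvTravel grid rows cols fuel r c d g cnt).1 =
        (pvWalk ((PySem.List.pyRange 0 (rows * cols * 4) 1).map (pvNext grid rows cols))
          fuel (pvEnc cols r c d) v cnt).1 ∧
      pvRel rows cols (pvTravel grid rows cols fuel r c d g cnt).2
        (pvWalk ((PySem.List.pyRange 0 (rows * cols * 4) 1).map (pvNext grid rows cols))
          fuel (pvEnc cols r c d) v cnt).2 := by
  intro fuel
  induction fuel with
  | zero => intro r c d g v cnt _ hrel; exact ⟨rfl, hrel⟩
  | succ fuel ih =>
    intro r c d g v cnt h hrel
    simp only [pvTravel, pvWalk]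
    rw [PySem.List.pySetD_of_nonneg _ _ (pvEnc_nonneg h),
      PySem.List.pyGetD_map_pyRange_of_nonneg _ _ _ _ (pvEnc_nonneg h) (pvEnc_lt h),
      pvNext_enc hc h]
    have hstep := pvStep_inR (grid := grid) hr hc h
    have hrel1 := pvRel_mark hc hrel h
    rw [pvPyGetD_nonneg _ _ (pvEnc_nonneg hstep), ← hrel1.2.2 _ _ _ hstep]
    by_cases hg : pvGet3 (pvSet3 g r c d) (PySem.Int.mod (r + (PySem.List.pyGetD pvDirs d (0, 0)).1 + rows) rows)
        (PySem.Int.mod (c + (PySem.List.pyGetD pvDirs d (0, 0)).2 + cols) cols)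
        (if pvCell grid (PySem.Int.mod (r + (PySem.List.pyGetD pvDirs d (0, 0)).1 + rows) rows)
              (PySem.Int.mod (c + (PySem.List.pyGetD pvDirs d (0, 0)).2 + cols) cols) = some 'L'
          then PySem.Int.mod (d + 3) 4
          else if pvCell grid (PySem.Int.mod (r + (PySem.List.pyGetD pvDirs d (0, 0)).1 + rows) rows)
              (PySem.Int.mod (c + (PySem.List.pyGetD pvDirs d (0, 0)).2 + cols) cols) = some 'R'
          then PySem.Int.mod (d + 1) 4 else d)
    · rw [if_pos hg, if_pos hg]
      exact ⟨rfl, hrel1⟩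
    · rw [if_neg hg, if_neg hg]
      exact ih _ _ _ _ _ _ hstep hrel1

lemma pvRange_mul3 (a b : Nat) (f : Nat → Int) :
    (List.range (a * b)).map f =
      (List.range a).flatMap (fun i => (List.range b).map (fun j => f (i * b + j))) := by
  induction a with
  | zero => simp
  | succ a ih =>
    rw [Nat.succ_mul, List.range_add, List.map_append, ih, List.range_succ,
      List.flatMap_append]
    simp [List.flatMap, List.map_map, Function.comp]

lemma pvRange_split (rows cols : Int) (hr : 0 ≤ rows) (hc : 0 ≤ cols) :
    PySem.List.pyRange 0 (rows * cols * 4) 1 =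
      (PySem.List.pyRange 0 rows 1).flatMap (fun i =>
        (PySem.List.pyRange 0 cols 1).flatMap (fun j =>
          (PySem.List.pyRange 0 4 1).map (fun k => pvEnc cols i j k))) := by
  obtain ⟨R, rfl⟩ := Int.eq_ofNat_of_zero_le hr
  obtain ⟨C, rfl⟩ := Int.eq_ofNat_of_zero_le hc
  rw [show (R : Int) * C * 4 = ((R * (C * 4) : Nat) : Int) by push_cast; ring]
  rw [PySem.List.pyRange_zero_nat, PySem.List.pyRange_zero_nat, PySem.List.pyRange_zero_nat,
    show PySem.List.pyRange 0 4 1 = (List.range 4).map (fun k => (k : Int)) from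
      PySem.List.pyRange_zero_nat 4]
  rw [pvRange_mul3 R (C * 4), List.flatMap_map]
  refine List.flatMap_congr ?_
  intro i _
  rw [List.flatMap_map, pvRange_mul3 C 4]
  refine List.flatMap_congr ?_
  intro j _
  simp [pvEnc, List.range_succ]
  refine ⟨by ring, by ring, by ring, by ring⟩

lemma pvFoldl_rel {α σ₁ σ₂ : Type} (R : σ₁ → σ₂ → Prop) (f : σ₁ → α → σ₁) (g : σ₂ → α → σ₂) :
    ∀ (l : List α) (s : σ₁) (t : σ₂),
      (∀ a ∈ l, ∀ s t, R s t → R (f s a) (g t a)) → R s t →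
      R (l.foldl f s) (l.foldl g t) := by
  intro l
  induction l with
  | nil => intro s t _ h; simp only [List.foldl_nil]; exact h
  | cons x xs ih =>
    intro s t hstep h
    simp only [List.foldl_cons]
    exact ih _ _ (fun a ha => hstep a (List.mem_cons_of_mem _ ha))
      (hstep x (List.mem_cons_self) s t h)

lemma pvFoldl_id {α σ : Type} (l : List α) (s : σ) : l.foldl (fun s _ => s) s = s := by
  induction l generalizing s with
  | nil => rfl
  | cons x xs ih => exact ih s

lemma pvRel_init (rows cols : Int) (hr : 0 ≤ rows) (hc : 0 ≤ cols) :
    pvRel rows cols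
      ((PySem.List.pyRange 0 rows 1).map (fun _ =>
        (PySem.List.pyRange 0 cols 1).map (fun _ =>
          (PySem.List.pyRange 0 4 1).map (fun _ => false))))
      (List.replicate (rows * cols * 4).toNat false) := by
  have hlen : ∀ (a : Int), (PySem.List.pyRange 0 a 1).length = a.toNat := by
    intro a; rw [PySem.List.length_pyRange_one]; omega
  refine ⟨⟨by simp [hlen], ?_⟩, by simp, ?_⟩
  · intro row hrow
    obtain ⟨_, _, rfl⟩ := List.mem_map.mp hrow
    refine ⟨by simp [hlen], ?_⟩
    intro cell hcell
    obtain ⟨_, _, rfl⟩ := List.mem_map.mp hcell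
    simp [hlen]
  · intro r c d h
    obtain ⟨h1, h2, h3, h4, h5, h6⟩ := h
    rw [pvGet3_eq_getD h1 h3 h5]
    have e1 : ((PySem.List.pyRange 0 rows 1).map (fun _ =>
        (PySem.List.pyRange 0 cols 1).map (fun _ =>
          (PySem.List.pyRange 0 4 1).map (fun _ => false)))).getD r.toNat [] =
        (PySem.List.pyRange 0 cols 1).map (fun _ =>
          (PySem.List.pyRange 0 4 1).map (fun _ => false)) := by
      rw [List.getD_eq_getElem _ _ (by simp [hlen]; omega)]
      simp
    rw [e1]
    have e2 : ((PySem.List.pyRange 0 cols 1).map (fun _ =>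
        (PySem.List.pyRange 0 4 1).map (fun _ => false))).getD c.toNat [] =
        (PySem.List.pyRange 0 4 1).map (fun _ => false) := by
      rw [List.getD_eq_getElem _ _ (by simp [hlen]; omega)]
      simp
    rw [e2]
    have e3 : ((PySem.List.pyRange 0 4 1).map (fun _ => false)).getD d.toNat false = false := by
      rw [List.getD_eq_getElem _ _ (by simp [hlen]; omega)]
      simp only [List.getElem_map]
    rw [e3]
    rcases pvGetD_mem_or (List.replicate (rows * cols * 4).toNat false)
      (pvEnc cols r c d).toNat false with hm | hm
    · exact (List.eq_of_mem_replicate hm).symm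
    · exact hm.symm

lemma pvMain (grid : List String) (rows cols : Int) (hr : 0 < rows) (hc : 0 < cols) :
    ((PySem.List.pyRange 0 rows 1).foldl (fun st i =>
      (PySem.List.pyRange 0 cols 1).foldl (fun st j =>
        (PySem.List.pyRange 0 4 1).foldl (fun st k =>
          if pvGet3 st.1 i j k then st
          else
            let p := pvTravel grid rows cols ((rows * cols * 4).toNat + 1) i j k st.1 0
            (p.2, st.2 ++ [p.1])) st) st)
      ((PySem.List.pyRange 0 rows 1).map (fun _ =>
        (PySem.List.pyRange 0 cols 1).map (fun _ =>
          (PySem.List.pyRange 0 4 1).map (fun _ => false))), ([] : List Int))).2 =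
    ((PySem.List.pyRange 0 (rows * cols * 4) 1).foldl (fun (st : List Bool × List Int) s =>
      if PySem.List.pyGetD st.1 s false then st
      else
        let p := pvWalk ((PySem.List.pyRange 0 (rows * cols * 4) 1).map (pvNext grid rows cols))
          ((rows * cols * 4).toNat + 1) s st.1 0
        (p.2, st.2 ++ [p.1]))
      (PySem.List.pyRepeat [false] (rows * cols * 4), ([] : List Int))).2 := by
  rw [PySem.List.pyRepeat_singleton]
  generalize hsucc : (PySem.List.pyRange 0 (rows * cols * 4) 1).map (pvNext grid rows cols) = succ
  conv_rhs => rw [pvRange_split rows cols hr.le hc.le]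
  rw [List.foldl_flatMap]
  have main := pvFoldl_rel
    (R := fun (a : List (List (List Bool)) × List Int) (b : List Bool × List Int) =>
      pvRel rows cols a.1 b.1 ∧ a.2 = b.2)
    (fun st i =>
      (PySem.List.pyRange 0 cols 1).foldl (fun st j =>
        (PySem.List.pyRange 0 4 1).foldl (fun st k =>
          if pvGet3 st.1 i j k then st
          else
            let p := pvTravel grid rows cols ((rows * cols * 4).toNat + 1) i j k st.1 0
            (p.2, st.2 ++ [p.1])) st) st)
    (fun st i =>
      ((PySem.List.pyRange 0 cols 1).flatMap (fun j =>
        (PySem.List.pyRange 0 4 1).map (fun k => pvEnc cols i j k))).foldl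
        (fun (st : List Bool × List Int) s =>
          if PySem.List.pyGetD st.1 s false then st
          else
            let p := pvWalk succ ((rows * cols * 4).toNat + 1) s st.1 0
            (p.2, st.2 ++ [p.1])) st)
    (PySem.List.pyRange 0 rows 1)
    ((PySem.List.pyRange 0 rows 1).map (fun _ =>
      (PySem.List.pyRange 0 cols 1).map (fun _ =>
        (PySem.List.pyRange 0 4 1).map (fun _ => false))), ([] : List Int))
    (List.replicate (rows * cols * 4).toNat false, ([] : List Int))
    ?_ ⟨pvRel_init rows cols hr.le hc.le, rfl⟩
  · exact main.2
  intro i hi s t hst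
  have hi' : 0 ≤ i ∧ i < rows := (PySem.List.mem_pyRange_one).mp hi |>.imp id id
  dsimp only
  rw [List.foldl_flatMap]
  refine pvFoldl_rel (R := fun (a : List (List (List Bool)) × List Int) (b : List Bool × List Int) => pvRel rows cols a.1 b.1 ∧ a.2 = b.2) _ _ _ _ _ ?_ hst
  intro j hj s' t' hst'
  have hj' : 0 ≤ j ∧ j < cols := (PySem.List.mem_pyRange_one).mp hj |>.imp id id
  rw [List.foldl_map]
  refine pvFoldl_rel (R := fun (a : List (List (List Bool)) × List Int) (b : List Bool × List Int) => pvRel rows cols a.1 b.1 ∧ a.2 = b.2) _ _ _ _ _ ?_ hst'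
  intro k hk st1 st2 hR
  dsimp only
  have hk' : 0 ≤ k ∧ k < 4 := (PySem.List.mem_pyRange_one).mp hk |>.imp id id
  have hInR : pvInR rows cols i j k := ⟨hi'.1, hi'.2, hj'.1, hj'.2, hk'.1, hk'.2⟩
  rw [pvPyGetD_nonneg _ _ (pvEnc_nonneg hInR), ← hR.1.2.2 i j k hInR]
  by_cases hg : pvGet3 st1.1 i j k
  · rw [if_pos hg, if_pos hg]; exact hR
  · rw [if_neg hg, if_neg hg]
    have hsim := pvWalk_sim (grid := grid) hr hc ((rows * cols * 4).toNat + 1) i j k st1.1 st2.1 0 hInR hR.1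
    rw [hsucc] at hsim
    exact ⟨hsim.2, by rw [hR.2, hsim.1]⟩

-- A = sorted(pvFlatCore): A's triple loop over the cube simulates the flat decomposition
lemma pvFlatEq (grid : List String) (hne : grid ≠ []) :
    solution grid = PySem.List.sorted
      (pvFlatCore grid (PySem.List.len grid) (PySem.Str.len (PySem.List.pyGetD grid 0 "")))
      (fun x => x) false := by
  simp only [solution, pvFlatCore, PySem.List.foldl_append_singleton_eq_map, List.nil_append]
  have hrows : (0 : Int) < PySem.List.len grid := by
    simp only [PySem.List.len_eq]
    exact_mod_cast List.length_pos_iff.mpr hne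
  have hcnn : (0 : Int) ≤ PySem.Str.len (PySem.List.pyGetD grid 0 "") := by
    simp [PySem.Str.len_eq]
  rcases lt_or_eq_of_le hcnn with hc | hc
  · rw [pvMain grid _ _ hrows hc]
  · rw [show PySem.List.pyRange 0 (PySem.Str.len (PySem.List.pyGetD grid 0 "")) 1 = [] from by
      rw [← hc]; exact PySem.List.pyRange_one_eq_nil (le_refl 0)]
    rw [show PySem.List.pyRange 0 (PySem.List.len grid * PySem.Str.len (PySem.List.pyGetD grid 0 "") * 4) 1 = [] from by
      rw [← hc]; simp]
    simp only [List.foldl_nil, pvFoldl_id]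

-- ===== permutation-orbit toolkit =====
def pvPerm (g : Int → Int) (n : Int) : Prop :=
  (∀ t, 0 ≤ t → t < n → 0 ≤ g t ∧ g t < n) ∧
  (∀ a b, 0 ≤ a → a < n → 0 ≤ b → b < n → g a = g b → a = b)

lemma pvIter_range {g : Int → Int} {n : Int} (hp : pvPerm g n) {t : Int}
    (h0 : 0 ≤ t) (h1 : t < n) : ∀ k, 0 ≤ g^[k] t ∧ g^[k] t < n := by
  intro k
  induction k with
  | zero => exact ⟨h0, h1⟩
  | succ k ih => rw [Function.iterate_succ_apply']; exact hp.1 _ ih.1 ih.2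

lemma pvIter_cancel {g : Int → Int} {n : Int} (hp : pvPerm g n) :
    ∀ (k : Nat) {a b : Int}, 0 ≤ a → a < n → 0 ≤ b → b < n →
      g^[k] a = g^[k] b → a = b := by
  intro k
  induction k with
  | zero => intro a b _ _ _ _ h; exact h
  | succ k ih =>
    intro a b ha0 ha1 hb0 hb1 h
    rw [Function.iterate_succ_apply, Function.iterate_succ_apply] at h
    have hga := hp.1 a ha0 ha1
    have hgb := hp.1 b hb0 hb1
    exact hp.2 a b ha0 ha1 hb0 hb1 (ih hga.1 hga.2 hgb.1 hgb.2 h)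

lemma pvRet {g : Int → Int} {n : Int} (hp : pvPerm g n) {t : Int}
    (h0 : 0 ≤ t) (h1 : t < n) : ∃ k, 1 ≤ k ∧ k ≤ n.toNat ∧ g^[k] t = t := by
  have hmap : Set.MapsTo (fun k => g^[k] t) ↑(Finset.range (n.toNat + 1))
      ↑(Finset.Ico (0 : Int) n) := by
    intro k _
    have := pvIter_range hp h0 h1 k
    simp only [Finset.coe_Ico, Set.mem_Ico]
    exact this
  have hcard : (Finset.Ico (0 : Int) n).card < (Finset.range (n.toNat + 1)).card := by
    rw [Int.card_Ico, Finset.card_range]; omega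
  obtain ⟨i, hi, j, hj, hne, heq⟩ := Finset.exists_ne_map_eq_of_card_lt_of_maps_to hcard hmap
  simp only [Finset.mem_range] at hi hj
  rcases Nat.lt_or_ge i j with hij | hij
  · refine ⟨j - i, by omega, by omega, ?_⟩
    have : g^[i] (g^[j - i] t) = g^[i] t := by
      rw [← Function.iterate_add_apply, show i + (j - i) = j by omega]; exact heq.symm
    have hr := pvIter_range hp h0 h1 (j - i)
    exact pvIter_cancel hp i hr.1 hr.2 h0 h1 this
  · have hij' : j < i := by omega
    refine ⟨i - j, by omega, by omega, ?_⟩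
    have : g^[j] (g^[i - j] t) = g^[j] t := by
      rw [← Function.iterate_add_apply, show j + (i - j) = i by omega]; exact heq
    have hr := pvIter_range hp h0 h1 (i - j)
    exact pvIter_cancel hp j hr.1 hr.2 h0 h1 this

-- first-return search with fuel (pvL g N t = the period of t when N is large enough)
def pvLA (g : Int → Int) (t : Int) : Nat → Int → Nat
  | 0, _ => 0
  | fuel + 1, u => if g u = t then 1 else pvLA g t fuel (g u) + 1

def pvL (g : Int → Int) (N : Nat) (t : Int) : Nat := pvLA g t N t

lemma pvLA_spec (g : Int → Int) (t : Int) :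
    ∀ (fuel : Nat) (u : Int), (∃ j, 1 ≤ j ∧ j ≤ fuel ∧ g^[j] u = t) →
      1 ≤ pvLA g t fuel u ∧ pvLA g t fuel u ≤ fuel ∧ g^[pvLA g t fuel u] u = t ∧
        ∀ j, 1 ≤ j → j < pvLA g t fuel u → g^[j] u ≠ t := by
  intro fuel
  induction fuel with
  | zero => intro u h; obtain ⟨j, h1, h2, _⟩ := h; omega
  | succ fuel ih =>
    intro u h
    by_cases hg : g u = t
    · simp only [pvLA, if_pos hg]
      exact ⟨le_refl 1, by omega, by simpa using hg, by omega⟩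
    · obtain ⟨j, h1, h2, h3⟩ := h
      have hj2 : 2 ≤ j := by
        rcases Nat.lt_or_ge j 2 with h | h
        · interval_cases j
          · simp at h3; exact absurd h3 hg
        · exact h
      have hex : ∃ j', 1 ≤ j' ∧ j' ≤ fuel ∧ g^[j'] (g u) = t := by
        refine ⟨j - 1, by omega, by omega, ?_⟩
        rw [← Function.iterate_succ_apply, show (j-1).succ = j by omega]; exact h3
      obtain ⟨i1, i2, i3, i4⟩ := ih (g u) hex
      simp only [pvLA, if_neg hg]
      refine ⟨by omega, by omega, ?_, ?_⟩
      · rw [Function.iterate_succ_apply]; exact i3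
      · intro j' hj1 hj2'
        rcases Nat.lt_or_ge j' 2 with h | h
        · interval_cases j'
          simpa using hg
        · rw [show j' = (j' - 1).succ by omega, Function.iterate_succ_apply]
          exact i4 (j' - 1) (by omega) (by omega)

lemma pvL_spec {g : Int → Int} {n : Int} (hp : pvPerm g n) {t : Int}
    (h0 : 0 ≤ t) (h1 : t < n) :
    1 ≤ pvL g n.toNat t ∧ pvL g n.toNat t ≤ n.toNat ∧ g^[pvL g n.toNat t] t = t ∧
      ∀ j, 1 ≤ j → j < pvL g n.toNat t → g^[j] t ≠ t := by
  have := pvLA_spec g t n.toNat t (by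
    obtain ⟨k, hk1, hk2, hk3⟩ := pvRet hp h0 h1
    exact ⟨k, hk1, hk2, hk3⟩)
  exact ⟨this.1, this.2.1, this.2.2.1, this.2.2.2⟩

lemma pvIter_mod {g : Int → Int} {t : Int} {L : Nat} (hL1 : 1 ≤ L)
    (hLt : g^[L] t = t) : ∀ k, g^[k] t = g^[k % L] t := by
  intro k
  induction k using Nat.strong_induction_on with
  | _ k ih =>
    rcases Nat.lt_or_ge k L with h | h
    · rw [Nat.mod_eq_of_lt h]
    · have e : k = (k - L) + L := by omega
      rw [e, Function.iterate_add_apply, hLt, ih (k - L) (by omega), Nat.add_mod_right]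

lemma pvIter_ne {g : Int → Int} {n : Int} (hp : pvPerm g n) {t : Int}
    (h0 : 0 ≤ t) (h1 : t < n) {i j : Nat} (hij : i < j) (hj : j < pvL g n.toNat t) :
    g^[i] t ≠ g^[j] t := by
  intro he
  have hr := pvIter_range hp h0 h1 (j - i)
  have : g^[i] (g^[j - i] t) = g^[i] t := by
    rw [← Function.iterate_add_apply, show i + (j - i) = j by omega]; exact he.symm
  have := pvIter_cancel hp i hr.1 hr.2 h0 h1 this
  exact (pvL_spec hp h0 h1).2.2.2 (j - i) (by omega) (by omega) this

-- orbit minimum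
def pvM (g : Int → Int) (N : Nat) (t : Int) : Int :=
  ((List.range (pvL g N t)).map (fun k => g^[k] t)).foldl min t

lemma pvM_le_self (g : Int → Int) (N : Nat) (t : Int) : pvM g N t ≤ t :=
  (PySem.List.foldl_min_le _ _).1

lemma pvM_le_iter (g : Int → Int) (N : Nat) (t : Int) {k : Nat} (hk : k < pvL g N t) :
    pvM g N t ≤ g^[k] t :=
  (PySem.List.foldl_min_le _ _).2 _ (List.mem_map.mpr ⟨k, List.mem_range.mpr hk, rfl⟩)

lemma pvM_mem {g : Int → Int} {n : Int} (hp : pvPerm g n) {t : Int}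
    (h0 : 0 ≤ t) (h1 : t < n) :
    ∃ k, k < pvL g n.toNat t ∧ g^[k] t = pvM g n.toNat t := by
  rcases PySem.List.foldl_min_mem
    ((List.range (pvL g n.toNat t)).map (fun k => g^[k] t)) t with h | h
  · exact ⟨0, (pvL_spec hp h0 h1).1, by simpa [pvM] using h.symm⟩
  · obtain ⟨k, hk, he⟩ := List.mem_map.mp h
    exact ⟨k, List.mem_range.mp hk, he⟩

lemma pvM_nonneg {g : Int → Int} {n : Int} (hp : pvPerm g n) {t : Int}
    (h0 : 0 ≤ t) (h1 : t < n) : 0 ≤ pvM g n.toNat t := by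
  obtain ⟨k, _, he⟩ := pvM_mem hp h0 h1
  rw [← he]; exact (pvIter_range hp h0 h1 k).1

-- the period is constant along an orbit
lemma pvL_apply {g : Int → Int} {n : Int} (hp : pvPerm g n) {t : Int}
    (h0 : 0 ≤ t) (h1 : t < n) : pvL g n.toNat (g t) = pvL g n.toNat t := by
  have hg := hp.1 t h0 h1
  have hs := pvL_spec hp h0 h1
  have hs' := pvL_spec hp hg.1 hg.2
  have comm : ∀ k, g^[k] (g t) = g (g^[k] t) := by
    intro k
    rw [← Function.iterate_succ_apply, Function.iterate_succ_apply']
  have hle : ¬ pvL g n.toNat (g t) < pvL g n.toNat t := by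
    intro hlt
    have : g^[pvL g n.toNat (g t)] t = t := by
      have := hs'.2.2.1
      rw [comm] at this
      have hr := pvIter_range hp h0 h1 (pvL g n.toNat (g t))
      exact hp.2 _ _ hr.1 hr.2 h0 h1 this
    exact hs.2.2.2 _ hs'.1 hlt this
  have hge : ¬ pvL g n.toNat t < pvL g n.toNat (g t) := by
    intro hlt
    have : g^[pvL g n.toNat t] (g t) = g t := by
      rw [comm, hs.2.2.1]
    exact hs'.2.2.2 _ hs.1 hlt this
  omega

-- orbit membership is the same for t and g t
lemma pvOrbit_apply_subset {g : Int → Int} {n : Int} (hp : pvPerm g n) {t : Int}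
    (h0 : 0 ≤ t) (h1 : t < n) {u : Int} :
    (∃ k, k < pvL g n.toNat (g t) ∧ g^[k] (g t) = u) ↔
      (∃ k, k < pvL g n.toNat t ∧ g^[k] t = u) := by
  have hg := hp.1 t h0 h1
  have hs := pvL_spec hp h0 h1
  have hLg : pvL g n.toNat (g t) = pvL g n.toNat t := pvL_apply hp h0 h1
  constructor
  · rintro ⟨k, hk, rfl⟩
    refine ⟨(k + 1) % pvL g n.toNat t, Nat.mod_lt _ (by omega), ?_⟩
    rw [← pvIter_mod hs.1 hs.2.2.1, Function.iterate_succ_apply]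
  · rintro ⟨k, hk, rfl⟩
    have hs' := pvL_spec hp hg.1 hg.2
    refine ⟨(k + pvL g n.toNat t - 1) % pvL g n.toNat (g t), Nat.mod_lt _ (by omega), ?_⟩
    rw [← pvIter_mod hs'.1 hs'.2.2.1]
    have e1 : g^[k + pvL g n.toNat t - 1] (g t) = g^[k + pvL g n.toNat t] t := by
      rw [← Function.iterate_succ_apply,
        show (k + pvL g n.toNat t - 1).succ = k + pvL g n.toNat t by omega]
    rw [e1, Function.iterate_add_apply, hs.2.2.1]

-- min characterization: pvM t is an orbit element below every orbit element
lemma pvM_eq_of_bounds {g : Int → Int} {n : Int} (hp : pvPerm g n) {t x : Int}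
    (h0 : 0 ≤ t) (h1 : t < n)
    (hmem : ∃ k, k < pvL g n.toNat t ∧ g^[k] t = x)
    (hlb : ∀ k, k < pvL g n.toNat t → x ≤ g^[k] t) :
    pvM g n.toNat t = x := by
  obtain ⟨k, hk, he⟩ := hmem
  obtain ⟨m, hm, hme⟩ := pvM_mem hp h0 h1
  have h2 : pvM g n.toNat t ≤ x := by rw [← he]; exact pvM_le_iter g n.toNat t hk
  have h3 : x ≤ pvM g n.toNat t := by rw [← hme]; exact hlb m hm
  omega

lemma pvM_apply {g : Int → Int} {n : Int} (hp : pvPerm g n) {t : Int}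
    (h0 : 0 ≤ t) (h1 : t < n) : pvM g n.toNat (g t) = pvM g n.toNat t := by
  have hg := hp.1 t h0 h1
  refine pvM_eq_of_bounds hp hg.1 hg.2 ?_ ?_
  · exact (pvOrbit_apply_subset hp h0 h1).mpr (pvM_mem hp h0 h1)
  · intro k hk
    obtain ⟨k', hk', he'⟩ := (pvOrbit_apply_subset hp h0 h1).mp ⟨k, hk, rfl⟩
    rw [← he']
    exact pvM_le_iter g n.toNat t hk'

lemma pvM_iter {g : Int → Int} {n : Int} (hp : pvPerm g n) {t : Int}
    (h0 : 0 ≤ t) (h1 : t < n) (k : Nat) : pvM g n.toNat (g^[k] t) = pvM g n.toNat t := by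
  induction k with
  | zero => rfl
  | succ k ih =>
    have hr := pvIter_range hp h0 h1 k
    rw [Function.iterate_succ_apply', pvM_apply hp hr.1 hr.2, ih]

-- s is its own orbit minimum iff every later orbit element is strictly above it
lemma pvM_eq_self_iff {g : Int → Int} {n : Int} (hp : pvPerm g n) {t : Int}
    (h0 : 0 ≤ t) (h1 : t < n) :
    pvM g n.toNat t = t ↔ ∀ k, 1 ≤ k → k < pvL g n.toNat t → t < g^[k] t := by
  constructor
  · intro hm k hk1 hk2
    have hle := pvM_le_iter g n.toNat t hk2
    rw [hm] at hle
    rcases lt_or_eq_of_le hle with h | h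
    · exact h
    · exact absurd h (by simpa using pvIter_ne hp h0 h1 (i := 0) (by omega) hk2)
  · intro hlt
    obtain ⟨k, hk, he⟩ := pvM_mem hp h0 h1
    rcases Nat.eq_zero_or_pos k with rfl | hk1
    · simpa using he.symm
    · have := hlt k hk1 hk
      have := pvM_le_self g n.toNat t
      omega

-- every u with pvM u = pvM t lies on t's orbit (used for the visited-set closure)
lemma pvMem_orbit_of_pvM_eq {g : Int → Int} {n : Int} (hp : pvPerm g n) {t u : Int}
    (ht0 : 0 ≤ t) (ht1 : t < n) (hu0 : 0 ≤ u) (hu1 : u < n)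
    (he : pvM g n.toNat u = pvM g n.toNat t) :
    ∃ i, i < pvL g n.toNat t ∧ g^[i] t = u := by
  obtain ⟨k, hk, hke⟩ := pvM_mem hp hu0 hu1
  obtain ⟨m, hm, hme⟩ := pvM_mem hp ht0 ht1
  have hsu := pvL_spec hp hu0 hu1
  have hst := pvL_spec hp ht0 ht1
  have hu_orb : g^[pvL g n.toNat u - k] (pvM g n.toNat u) = u := by
    rw [← hke, ← Function.iterate_add_apply, show pvL g n.toNat u - k + k = pvL g n.toNat u by omega]
    exact hsu.2.2.1
  have hcomp : g^[(pvL g n.toNat u - k) + m] t = u := by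
    rw [Function.iterate_add_apply, hme, ← he, hu_orb]
  refine ⟨((pvL g n.toNat u - k) + m) % pvL g n.toNat t, Nat.mod_lt _ (by omega), ?_⟩
  rw [← pvIter_mod hst.1 hst.2.2.1, hcomp]

-- ===== B-walk characterization and the common closed form =====

-- the common value both cores compute: one length per cycle, at the cycle's minimal state
def pvAns (grid : List String) (rows cols : Int) : List Int :=
  ((PySem.List.pyRange 0 (rows * cols * 4) 1).filter
      (fun s => decide (pvM (pvNext grid rows cols) (rows * cols * 4).toNat s = s))).map
    (fun s => ((pvL (pvNext grid rows cols) (rows * cols * 4).toNat s : Nat) : Int))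

-- decoding an encoded state
lemma pvDecode {rows cols s : Int} (_hr : 0 < rows) (hc : 0 < cols)
    (h0 : 0 ≤ s) (h1 : s < rows * cols * 4) :
    pvInR rows cols (PySem.Int.floordiv (PySem.Int.floordiv s 4) cols)
      (PySem.Int.mod (PySem.Int.floordiv s 4) cols) (PySem.Int.mod s 4) ∧
    pvEnc cols (PySem.Int.floordiv (PySem.Int.floordiv s 4) cols)
      (PySem.Int.mod (PySem.Int.floordiv s 4) cols) (PySem.Int.mod s 4) = s := by
  rw [PySem.Int.mod_eq_emod_of_pos (show (0:Int) < 4 by norm_num),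
    PySem.Int.floordiv_eq_ediv_of_pos (show (0:Int) < 4 by norm_num),
    PySem.Int.mod_eq_emod_of_pos hc, PySem.Int.floordiv_eq_ediv_of_pos hc]
  have hrc0 : 0 ≤ s / 4 := Int.ediv_nonneg h0 (by norm_num)
  have hrc1 : s / 4 < rows * cols := by omega
  have hco : cols * (s / 4 / cols) + s / 4 % cols = s / 4 := Int.mul_ediv_add_emod _ _
  refine ⟨⟨Int.ediv_nonneg hrc0 hc.le, ?_, Int.emod_nonneg _ hc.ne', Int.emod_lt_of_pos _ hc,
    by omega, by omega⟩, ?_⟩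
  · rw [Int.ediv_lt_iff_lt_mul hc]; omega
  · unfold pvEnc
    have : s / 4 / cols * cols + s / 4 % cols = s / 4 := by linarith [mul_comm (s / 4 / cols) cols]
    rw [this]; omega

-- undoing a wrapped unit step
lemma pvUndo (m r k : Int) (_hm : 0 < m) (h0 : 0 ≤ r) (h1 : r < m) :
    ((r + k + m) % m - k + m) % m = r := by
  have h2 : (r + k + m) % m = (r + k) % m := by
    rw [show r + k + m = r + k + m * 1 by ring, Int.add_mul_emod_self_left]
  have h3 : ((r + k) % m - k + m) % m = ((r + k) % m - k) % m := by
    rw [show (r + k) % m - k + m = ((r + k) % m - k) + m * 1 by ring, Int.add_mul_emod_self_left]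
  rw [h2, h3, Int.sub_emod, Int.emod_emod_of_dvd _ (dvd_refl m), ← Int.sub_emod,
    add_sub_cancel_right, Int.emod_eq_of_lt h0 h1]

-- pvNext is a permutation of [0, rows*cols*4): the turn written at the target cell and
-- the wrapped step are both invertible
lemma pvNext_perm (grid : List String) (rows cols : Int) (hr : 0 < rows) (hc : 0 < cols) :
    pvPerm (pvNext grid rows cols) (rows * cols * 4) := by
  constructor
  · intro t h0 h1
    obtain ⟨hin, henc⟩ := pvDecode hr hc h0 h1
    rw [← henc, pvNext_enc hc hin]
    have hstep := pvStep_inR (grid := grid) hr hc hin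
    exact ⟨pvEnc_nonneg hstep, pvEnc_lt hstep⟩
  · intro a b ha0 ha1 hb0 hb1 hab
    obtain ⟨hina, henca⟩ := pvDecode hr hc ha0 ha1
    obtain ⟨hinb, hencb⟩ := pvDecode hr hc hb0 hb1
    rw [← henca, pvNext_enc hc hina, ← hencb, pvNext_enc hc hinb] at hab
    set ra := PySem.Int.floordiv (PySem.Int.floordiv a 4) cols with hra
    set ca := PySem.Int.mod (PySem.Int.floordiv a 4) cols with hca
    set da := PySem.Int.mod a 4 with hda
    set rb := PySem.Int.floordiv (PySem.Int.floordiv b 4) cols with hrb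
    set cb := PySem.Int.mod (PySem.Int.floordiv b 4) cols with hcb
    set db := PySem.Int.mod b 4 with hdb
    have hstepa := pvStep_inR (grid := grid) hr hc hina
    have hstepb := pvStep_inR (grid := grid) hr hc hinb
    obtain ⟨hR, hC, hD⟩ := pvEnc_inj hc hstepa hstepb hab
    obtain ⟨ha1', ha2', ha3', ha4', ha5', ha6'⟩ := hina
    obtain ⟨hb1', hb2', hb3', hb4', hb5', hb6'⟩ := hinb
    -- the turn direction is recoverable: same target cell, so same turn rule
    rw [hR, hC] at hD
    have hdd : da = db := by
      have e4 : (0:Int) < 4 := by norm_num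
      split_ifs at hD <;> (try simp only [PySem.Int.mod_eq_emod_of_pos e4] at hD) <;> omega
    rw [hdd] at hR hC
    -- the wrapped step is recoverable
    have hRr : ra = rb := by
      have h1 := pvUndo rows ra (PySem.List.pyGetD pvDirs db (0, 0)).1 hr ha1' ha2'
      have h2 := pvUndo rows rb (PySem.List.pyGetD pvDirs db (0, 0)).1 hr hb1' hb2'
      rw [PySem.Int.mod_eq_emod_of_pos hr, PySem.Int.mod_eq_emod_of_pos hr] at hR
      rw [← h1, ← h2, hR]
    have hCc : ca = cb := by
      have h1 := pvUndo cols ca (PySem.List.pyGetD pvDirs db (0, 0)).2 hc ha3' ha4'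
      have h2 := pvUndo cols cb (PySem.List.pyGetD pvDirs db (0, 0)).2 hc hb3' hb4'
      rw [PySem.Int.mod_eq_emod_of_pos hc, PySem.Int.mod_eq_emod_of_pos hc] at hC
      rw [← h1, ← h2, hC]
    rw [← henca, ← hencb, hRr, hCc, hdd]

-- B's walk from nxt(s): runs to the first index K ≥ 1 with g^[K] s ≤ s
lemma pvBwalk_run (grid : List String) (rows cols s : Int) :
    ∀ (fuel j : Nat), 1 ≤ j →
      (∃ m, j ≤ m ∧ m ≤ j + fuel ∧ (pvNext grid rows cols)^[m] s ≤ s) →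
      ∃ K, j ≤ K ∧ (∀ i, j ≤ i → i < K → s < (pvNext grid rows cols)^[i] s) ∧
        (pvNext grid rows cols)^[K] s ≤ s ∧
        pvBwalk grid rows cols s fuel ((pvNext grid rows cols)^[j] s) (j : Int) =
          ((pvNext grid rows cols)^[K] s, (K : Int)) := by
  intro fuel
  induction fuel with
  | zero =>
    intro j hj hex
    obtain ⟨m, hm1, hm2, hm3⟩ := hex
    have : m = j := by omega
    subst this
    exact ⟨m, le_refl _, by omega, hm3, by simp [pvBwalk]⟩
  | succ fuel ih =>
    intro j hj hex
    by_cases h : s < (pvNext grid rows cols)^[j] s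
    · have hex' : ∃ m, j + 1 ≤ m ∧ m ≤ j + 1 + fuel ∧ (pvNext grid rows cols)^[m] s ≤ s := by
        obtain ⟨m, hm1, hm2, hm3⟩ := hex
        have : m ≠ j := fun he => by rw [he] at hm3; omega
        exact ⟨m, by omega, by omega, hm3⟩
      obtain ⟨K, hK1, hK2, hK3, hK4⟩ := ih (j + 1) (by omega) hex'
      refine ⟨K, by omega, ?_, hK3, ?_⟩
      · intro i hi1 hi2
        rcases Nat.eq_or_lt_of_le hi1 with rfl | hlt
        · exact h
        · exact hK2 i (by omega) hi2
      · simp only [pvBwalk, if_pos h]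
        rw [← Function.iterate_succ_apply' (pvNext grid rows cols) j s]
        rw [show ((j : Int) + 1) = ((j + 1 : Nat) : Int) by push_cast; ring]
        exact hK4
    · exact ⟨j, le_refl _, by omega, by omega, by simp [pvBwalk, h]⟩

-- B's core loop computes pvAns
lemma pvBCore_eq (grid : List String) (rows cols : Int) (hr : 0 < rows) (hc : 0 < cols) :
    ((PySem.List.pyRange 0 (rows * cols * 4) 1).foldl (fun (lengths : List Int) s =>
        let p := pvBwalk grid rows cols s ((rows * cols * 4).toNat + 1)
          (pvNext grid rows cols s) 1
        if p.1 = s then lengths ++ [p.2] else lengths) []) = pvAns grid rows cols := by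
  have hp := pvNext_perm grid rows cols hr hc
  rw [PySem.List.foldl_congr_mem _ _
    (fun (lengths : List Int) s =>
      if decide (pvM (pvNext grid rows cols) (rows * cols * 4).toNat s = s) = true
      then lengths ++ [((pvL (pvNext grid rows cols) (rows * cols * 4).toNat s : Nat) : Int)]
      else lengths) _ ?_]
  · exact PySem.List.foldl_append_if _ _ _ _
  intro acc s hs
  obtain ⟨hs0, hs1⟩ := PySem.List.mem_pyRange_one.mp hs
  have hls := pvL_spec hp hs0 hs1
  -- run the walk
  have hrun := pvBwalk_run grid rows cols s ((rows * cols * 4).toNat + 1) 1 (le_refl 1)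
    ⟨pvL (pvNext grid rows cols) (rows * cols * 4).toNat s, hls.1, by omega,
      by rw [hls.2.2.1]⟩
  obtain ⟨K, hK1, hK2, hK3, hK4⟩ := hrun
  rw [show (pvNext grid rows cols)^[1] s = pvNext grid rows cols s by
    rw [Function.iterate_one]] at hK4
  rw [show ((1 : Nat) : Int) = (1 : Int) by norm_num] at hK4
  dsimp only
  rw [hK4]
  by_cases hmin : pvM (pvNext grid rows cols) (rows * cols * 4).toNat s = s
  · -- s is a cycle leader: the walk goes exactly once around, K = L s
    have hKL : K = pvL (pvNext grid rows cols) (rows * cols * 4).toNat s := by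
      have hgt := (pvM_eq_self_iff hp hs0 hs1).mp hmin
      have h1 : ¬ K < pvL (pvNext grid rows cols) (rows * cols * 4).toNat s := by
        intro h
        have := hgt K hK1 h
        omega
      have h2 : ¬ pvL (pvNext grid rows cols) (rows * cols * 4).toNat s < K := by
        intro h
        have := hK2 _ hls.1 h
        rw [hls.2.2.1] at this
        omega
      omega
    rw [hKL, hls.2.2.1, if_pos rfl, if_pos (by simpa using hmin)]
  · -- not a leader: the walk stops strictly below s
    have hne : (pvNext grid rows cols)^[K] s ≠ s := by
      intro heq
      -- then no orbit element in [1, K) is ≤ s, and g^[K] s = s forces K ≥ L,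
      -- yet the orbit minimum is < s and occurs at an index < L ≤ K
      obtain ⟨k0, hk0L, hk0e⟩ := pvM_mem hp hs0 hs1
      have hk0pos : 1 ≤ k0 := by
        rcases Nat.eq_zero_or_pos k0 with rfl | h
        · simp only [Function.iterate_zero_apply] at hk0e
          exact absurd hk0e.symm hmin
        · exact h
      have hLK : pvL (pvNext grid rows cols) (rows * cols * 4).toNat s ≤ K := by
        by_contra h
        exact hls.2.2.2 K hK1 (by omega) heq
      have := hK2 k0 hk0pos (by omega)
      have hMle := pvM_le_self (pvNext grid rows cols) (rows * cols * 4).toNat s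
      rw [hk0e] at this
      omega
    rw [if_neg hne, if_neg (by simpa using hmin)]


lemma pvM_idem {g : Int → Int} {n : Int} (hp : pvPerm g n) {u : Int}
    (h0 : 0 ≤ u) (h1 : u < n) :
    pvM g n.toNat (pvM g n.toNat u) = pvM g n.toNat u := by
  obtain ⟨k, _, he⟩ := pvM_mem hp h0 h1
  rw [← he, pvM_iter hp h0 h1, he]

-- A's walk from an unvisited cycle leader marks exactly the cycle and counts its length
lemma pvWalkA {g : Int → Int} {n : Int} (hp : pvPerm g n) {s : Int}
    (hs0 : 0 ≤ s) (hs1 : s < n) (hmin : pvM g n.toNat s = s) :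
    ∀ (fuel j : Nat) (v : List Bool) (cnt : Int),
      j < pvL g n.toNat s → pvL g n.toNat s - j ≤ fuel →
      v.length = n.toNat →
      (∀ u, 0 ≤ u → u < n → ((v.getD u.toNat false = true) ↔
        (pvM g n.toNat u < s ∨ ∃ i, i < j ∧ g^[i] s = u))) →
      ∃ v', pvWalk ((PySem.List.pyRange 0 n 1).map g) fuel (g^[j] s) v cnt
          = (cnt + ((pvL g n.toNat s - j : Nat) : Int), v') ∧ v'.length = n.toNat ∧
        (∀ u, 0 ≤ u → u < n → ((v'.getD u.toNat false = true) ↔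
          (pvM g n.toNat u < s ∨ ∃ i, i < pvL g n.toNat s ∧ g^[i] s = u))) := by
  have hls := pvL_spec hp hs0 hs1
  intro fuel
  induction fuel with
  | zero => intro j v cnt hj hfuel _ _; omega
  | succ fuel ih =>
    intro j v cnt hj hfuel hvl hvc
    have hjr := pvIter_range hp hs0 hs1 j
    have hj1r := pvIter_range hp hs0 hs1 (j + 1)
    simp only [pvWalk]
    rw [PySem.List.pySetD_of_nonneg _ _ hjr.1,
      PySem.List.pyGetD_map_pyRange_of_nonneg _ _ _ _ hjr.1 hjr.2,
      ← Function.iterate_succ_apply' g j s]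
    have hv1c : ∀ u, 0 ≤ u → u < n →
        (((v.set (g^[j] s).toNat true).getD u.toNat false = true) ↔
          (pvM g n.toNat u < s ∨ ∃ i, i < j + 1 ∧ g^[i] s = u)) := by
      intro u hu0 hu1
      rw [pvGetD_set _ _ _ _ _ (by rw [hvl]; omega)]
      by_cases he : (g^[j] s).toNat = u.toNat
      · have heu : g^[j] s = u := by omega
        rw [if_pos he]
        simp only [true_iff]
        exact Or.inr ⟨j, by omega, heu⟩
      · rw [if_neg he, hvc u hu0 hu1]
        constructor
        · rintro (h | ⟨i, hi, hie⟩)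
          · exact Or.inl h
          · exact Or.inr ⟨i, by omega, hie⟩
        · rintro (h | ⟨i, hi, hie⟩)
          · exact Or.inl h
          · rcases Nat.lt_or_ge i j with h' | h'
            · exact Or.inr ⟨i, h', hie⟩
            · have : i = j := by omega
              subst this
              exact absurd (by omega : (g^[i] s).toNat = u.toNat) (by rw [hie] at he; omega)
    rw [pvPyGetD_nonneg _ _ hj1r.1]
    have hMorb : pvM g n.toNat (g^[j + 1] s) = pvM g n.toNat s := pvM_iter hp hs0 hs1 (j + 1)
    rcases Nat.lt_or_ge (j + 1) (pvL g n.toNat s) with hlt | hge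
    · -- not yet around: the next state is unmarked
      have hunm : (v.set (g^[j] s).toNat true).getD (g^[j + 1] s).toNat false = false := by
        rw [Bool.eq_false_iff]
        intro hmark
        rcases (hv1c _ hj1r.1 hj1r.2).mp hmark with h | ⟨i, hi, hie⟩
        · rw [hMorb, hmin] at h
          omega
        · exact absurd hie (pvIter_ne hp hs0 hs1 (by omega) hlt)
      rw [hunm]
      simp only [Bool.false_eq_true, if_false]
      obtain ⟨v', hv'1, hv'2, hv'3⟩ := ih (j + 1) _ (cnt + 1) hlt (by omega) (by simpa using hvl) hv1c
      refine ⟨v', ?_, hv'2, hv'3⟩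
      rw [hv'1]
      congr 1
      omega
    · -- j + 1 = L: the next state is s itself, already marked
      have hJL : j + 1 = pvL g n.toNat s := by omega
      have hback : g^[j + 1] s = s := by rw [hJL]; exact hls.2.2.1
      have hm : (v.set (g^[j] s).toNat true).getD (g^[j + 1] s).toNat false = true := by
        rw [(hv1c _ hj1r.1 hj1r.2)]
        exact Or.inr ⟨0, by omega, by simpa using hback.symm⟩
      rw [hm]
      simp only [if_true]
      refine ⟨v.set (g^[j] s).toNat true, ?_, by simpa using hvl, ?_⟩
      · rw [show pvL g n.toNat s - j = 1 by omega]
        norm_num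
      · intro u hu0 hu1
        rw [hv1c u hu0 hu1, hJL]

-- A's flat loop: after processing states 0..m-1, the visited array holds exactly the
-- states whose cycle minimum is below m, and the answers are one length per leader seen
lemma pvAFold {g : Int → Int} {n : Int} (hp : pvPerm g n) :
    ∀ (m : Nat), (m : Int) ≤ n →
      ∃ v, ((PySem.List.pyRange 0 (m : Int) 1).foldl (fun (st : List Bool × List Int) s =>
          if PySem.List.pyGetD st.1 s false then st
          else
            let p := pvWalk ((PySem.List.pyRange 0 n 1).map g) (n.toNat + 1) s st.1 0
            (p.2, st.2 ++ [p.1]))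
        (List.replicate n.toNat false, ([] : List Int)))
        = (v, ((PySem.List.pyRange 0 (m : Int) 1).filter
            (fun s => decide (pvM g n.toNat s = s))).map
              (fun s => ((pvL g n.toNat s : Nat) : Int)))
        ∧ v.length = n.toNat
        ∧ (∀ u, 0 ≤ u → u < n → ((v.getD u.toNat false = true) ↔ pvM g n.toNat u < (m : Int))) := by
  intro m
  induction m with
  | zero =>
    intro _
    refine ⟨List.replicate n.toNat false, ?_, by simp, ?_⟩
    · rw [show ((0 : Nat) : Int) = (0 : Int) by norm_num,
        PySem.List.pyRange_one_eq_nil (le_refl 0)]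
      simp
    · intro u hu0 hu1
      constructor
      · intro h
        rcases pvGetD_mem_or (List.replicate n.toNat false) u.toNat false with hm | hm
        · rw [List.eq_of_mem_replicate hm] at h; simp at h
        · rw [hm] at h; simp at h
      · intro h
        have := pvM_nonneg hp hu0 hu1
        omega
  | succ m ih =>
    intro hmn
    obtain ⟨v, hfold, hvl, hvc⟩ := ih (by push_cast at hmn ⊢; omega)
    have hs0 : (0 : Int) ≤ (m : Int) := by positivity
    have hs1 : ((m : Int)) < n := by push_cast at hmn; omega
    have hls := pvL_spec hp hs0 hs1
    rw [show ((m + 1 : Nat) : Int) = (m : Int) + 1 by push_cast; ring,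
      PySem.List.pyRange_one_succ_right (by positivity), List.foldl_append,
      List.filter_append, List.map_append, hfold]
    simp only [List.foldl_cons, List.foldl_nil, List.filter_cons, List.filter_nil]
    by_cases hmin : pvM g n.toNat (m : Int) = (m : Int)
    · -- leader: run the walk
      have hunv : PySem.List.pyGetD v (m : Int) false = false := by
        rw [pvPyGetD_nonneg _ _ hs0, Bool.eq_false_iff]
        intro h
        have := (hvc _ hs0 hs1).mp h
        omega
      rw [hunv]
      simp only [Bool.false_eq_true, if_false]
      obtain ⟨v', hv'1, hv'2, hv'3⟩ := pvWalkA hp hs0 hs1 hmin (n.toNat + 1) 0 v 0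
        (by omega) (by omega) hvl (by
          intro u hu0 hu1
          rw [hvc u hu0 hu1]
          constructor
          · exact fun h => Or.inl h
          · rintro (h | ⟨i, hi, _⟩)
            · exact h
            · omega)
      rw [show g^[0] (m : Int) = (m : Int) from rfl] at hv'1
      rw [hv'1]
      refine ⟨v', ?_, hv'2, ?_⟩
      · rw [if_pos (by simpa using hmin)]
        simp
      · intro u hu0 hu1
        rw [hv'3 u hu0 hu1]
        constructor
        · rintro (h | ⟨i, hi, rfl⟩)
          · omega
          · rw [pvM_iter hp hs0 hs1 i, hmin]
            omega
        · intro h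
          rcases lt_or_eq_of_le (show pvM g n.toNat u ≤ (m : Int) by omega) with h' | h'
          · exact Or.inl h'
          · refine Or.inr ?_
            obtain ⟨i, hi, hie⟩ := pvMem_orbit_of_pvM_eq hp hs0 hs1 hu0 hu1 (by rw [h', hmin])
            exact ⟨i, hi, hie⟩
    · -- already visited: its cycle minimum is below m
      have hvis : PySem.List.pyGetD v (m : Int) false = true := by
        rw [pvPyGetD_nonneg _ _ hs0, hvc _ hs0 hs1]
        have := pvM_le_self g n.toNat (m : Int)
        omega
      rw [hvis]
      simp only [if_true]
      refine ⟨v, ?_, hvl, ?_⟩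
      · rw [if_neg (by simpa using hmin)]
        simp
      · intro u hu0 hu1
        rw [hvc u hu0 hu1]
        constructor
        · intro h; omega
        · intro h
          rcases lt_or_eq_of_le (show pvM g n.toNat u ≤ (m : Int) by omega) with h' | h'
          · exact h'
          · exfalso
            apply hmin
            rw [← h', pvM_idem hp hu0 hu1, h']
  -- (the simp only above handles the decide in the filter)

-- A's core equals the closed form
lemma pvACore_eq (grid : List String) (rows cols : Int) (hr : 0 < rows) (hc : 0 < cols) :
    pvFlatCore grid rows cols = pvAns grid rows cols := by
  have hp := pvNext_perm grid rows cols hr hc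
  have hn0 : (0 : Int) ≤ rows * cols * 4 := by positivity
  unfold pvFlatCore pvAns
  simp only [PySem.List.foldl_append_singleton_eq_map, List.nil_append,
    PySem.List.pyRepeat_singleton]
  obtain ⟨v, hfold, _, _⟩ := pvAFold hp (rows * cols * 4).toNat
    (by rw [Int.toNat_of_nonneg hn0])
  rw [show (((rows * cols * 4).toNat : Nat) : Int) = rows * cols * 4 from
    Int.toNat_of_nonneg hn0] at hfold
  rw [hfold]

lemma pvFinal (grid : List String) (hne : grid ≠ []) : solution grid = solution_alt grid := by
  rw [pvFlatEq grid hne]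
  simp only [solution_alt]
  have hrows : (0 : Int) < PySem.List.len grid := by
    simp only [PySem.List.len_eq]
    exact_mod_cast List.length_pos_iff.mpr hne
  have hcnn : (0 : Int) ≤ PySem.Str.len (PySem.List.pyGetD grid 0 "") := by
    simp [PySem.Str.len_eq]
  rcases lt_or_eq_of_le hcnn with hcpos | hc0
  · rw [pvACore_eq _ _ _ hrows hcpos, pvBCore_eq _ _ _ hrows hcpos]
  · rw [show PySem.List.pyRange 0
        (PySem.List.len grid * PySem.Str.len (PySem.List.pyGetD grid 0 "") * 4) 1 = [] from by
      rw [← hc0]; simp]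
    simp only [List.foldl_nil, pvFlatCore]
    rw [show PySem.List.pyRange 0
        (PySem.List.len grid * PySem.Str.len (PySem.List.pyGetD grid 0 "") * 4) 1 = [] from by
      rw [← hc0]; simp]
    simp only [List.foldl_nil]

-- ===== VERDICT (by name: the statement is the Claim_ definition above) =====
theorem solution_spec : Claim_equal_solution := by
  intro grid _ hpre
  unfold Spec_solution
  exact pvFinal grid hpre.1
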